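-- pv_equiv track=rewrite | github.com/XCodeBunnyX/CodeForge | app.py | count_delimiters
-- ===== SOURCE A (Python) =====
-- def count_delimiters(text, open_ch, close_ch):
--     opens = closes = 0
--     state = "code"
--     i = 0
--     while i < len(text):
--         c = text[i]
--         if state == "line":
--             if c == '\n': state = "code"
--             i += 1
--             continue
--         if state == "block":
--             if c == '*' and i+1 < len(text) and text[i+1] == '/': state = "code"; i += 2
--             else: i += 1
--             continue
--         if state in ("dquote", "squote"):
--             q = '"' if state == "dquote" else "'"
--             if c == '\\' and i+1 < len(text): i += 2; continue
--             if c == q: state = "code"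
--             i += 1
--             continue
--         if c == '/' and i+1 < len(text):
--             if text[i+1] == '/': state = "line"; i += 2; continue
--             if text[i+1] == '*': state = "block"; i += 2; continue
--         if c == '"': state = "dquote"; i += 1; continue
--         if c == "'": state = "squote"; i += 1; continue
--         if c == open_ch: opens += 1
--         if c == close_ch: closes += 1
--         i += 1
--     return opens, closes
-- ===== SOURCE B (Python) =====
-- def _skip_string(text, j, q):
--     # return the index just past the closing quote (or len(text) if unterminated)
--     n = len(text)
--     while j < n:
--         if text[j] == '\\' and j + 1 < n:
--             j += 2
--         elif text[j] == q:
--             return j + 1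
--         else:
--             j += 1
--     return n
--
--
-- def count_delimiters(text, open_ch, close_ch):
--     # Token-level scanner: jump over whole comment/string tokens at once and
--     # collect the code-only segments, then count the delimiter characters in them.
--     n = len(text)
--     segments = []
--     i = 0
--     start = 0
--     while i < n:
--         c = text[i]
--         if c == '/' and text.startswith('//', i):
--             segments.append(text[start:i])
--             nl = text.find('\n', i + 2)
--             i = n if nl == -1 else nl + 1
--             start = i
--         elif c == '/' and text.startswith('/*', i):
--             segments.append(text[start:i])
--             end = text.find('*/', i + 2)
--             i = n if end == -1 else end + 2
--             start = i
--         elif c == '"' or c == "'":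
--             segments.append(text[start:i])
--             i = _skip_string(text, i + 1, c)
--             start = i
--         else:
--             i += 1
--     segments.append(text[start:n])
--     opens = sum(seg.count(open_ch) for seg in segments) if len(open_ch) == 1 else 0
--     closes = sum(seg.count(close_ch) for seg in segments) if len(close_ch) == 1 else 0
--     return opens, closes
-- ===== Notes on version B (the rewrite author's own statement) =====
-- stated objective: alternative
-- what changed: Replaces A's character-at-a-time five-state machine by a token-level scanner that jumps over whole comment/string tokens (using str.find and a dedicated string-skipper), collects the code-only segments, and counts the delimiter characters per segment with str.count at the end; it tends to run faster on comment/string-heavy input but a plain-code input keeps the same per-character cost.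
import Mathlib
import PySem

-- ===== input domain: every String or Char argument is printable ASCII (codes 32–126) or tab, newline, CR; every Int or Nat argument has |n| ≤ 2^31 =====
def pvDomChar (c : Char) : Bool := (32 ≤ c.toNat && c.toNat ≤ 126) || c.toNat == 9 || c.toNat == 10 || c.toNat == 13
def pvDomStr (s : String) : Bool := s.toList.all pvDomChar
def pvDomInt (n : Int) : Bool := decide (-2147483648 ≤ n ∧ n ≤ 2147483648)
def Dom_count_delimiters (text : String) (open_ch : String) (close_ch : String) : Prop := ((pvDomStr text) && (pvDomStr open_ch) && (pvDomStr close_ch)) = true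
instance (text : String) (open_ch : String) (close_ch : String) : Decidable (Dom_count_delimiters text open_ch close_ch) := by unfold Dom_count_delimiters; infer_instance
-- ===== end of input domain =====

-- B replaces A's char-by-char five-state machine by a token-level scanner that jumps over whole comment/string
-- tokens and counts delimiter characters in the collected code segments (objective: alternative decomposition).


-- ===== PORT A =====
-- Literal port of A's while-loop over the character list; `i+1 < len(text)` look-aheads become
-- pattern matches on the tail; Python's `c == open_ch` (1-char string vs string) is ported exactly
-- as `open_ch.toList = [c]`.
def pvLoopA (open_ch close_ch : String) : List Char → String → Int → Int → Int × Int
  | [], _, opens, closes => (opens, closes)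
  | c :: rest, state, opens, closes =>
    if state = "line" then
      pvLoopA open_ch close_ch rest (if c = '\n' then "code" else state) opens closes
    else if state = "block" then
      match c, rest with
      | '*', '/' :: rest2 => pvLoopA open_ch close_ch rest2 "code" opens closes
      | _, r0 => pvLoopA open_ch close_ch r0 state opens closes
    else if state = "dquote" ∨ state = "squote" then
      -- A's local `q = '"' if state == "dquote" else "'"` is inlined at its use site
      match c, rest with
      | '\\', _ :: rest2 => pvLoopA open_ch close_ch rest2 state opens closes
      | c0, r0 =>
        pvLoopA open_ch close_ch r0
          (if c0 = (if state = "dquote" then '"' else '\'') then "code" else state) opens closes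
    else
      match c, rest with
      | '/', '/' :: rest2 => pvLoopA open_ch close_ch rest2 "line" opens closes
      | '/', '*' :: rest2 => pvLoopA open_ch close_ch rest2 "block" opens closes
      | c0, r0 =>
        if c0 = '"' then pvLoopA open_ch close_ch r0 "dquote" opens closes
        else if c0 = '\'' then pvLoopA open_ch close_ch r0 "squote" opens closes
        else pvLoopA open_ch close_ch r0 state
          (opens + (if open_ch.toList = [c0] then 1 else 0))
          (closes + (if close_ch.toList = [c0] then 1 else 0))
  termination_by cs _ _ _ => cs.length
  decreasing_by all_goals simp_all

def count_delimiters (text : String) (open_ch : String) (close_ch : String) : Int × Int :=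
  pvLoopA open_ch close_ch text.toList "code" 0 0

-- ===== PORT B =====
-- port of Source B's `text.find('\n', i+2)` jump: drop through the first newline (inclusive)
def pvDropLine : List Char → List Char
  | [] => []
  | c :: r => if c = '\n' then r else pvDropLine r

-- port of Source B's `text.find('*/', i+2)` jump: drop through the first "*/" (inclusive)
def pvDropBlock : List Char → List Char
  | [] => []
  | '*' :: '/' :: r => r
  | _ :: r => pvDropBlock r

-- port of Source B's _skip_string (index j rendered as the remaining suffix)
def pvSkipStr (q : Char) : List Char → List Char
  | [] => []
  | c :: r =>
    match c, r with
    | '\\', _ :: r2 => pvSkipStr q r2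
    | c0, r0 => if c0 = q then r0 else pvSkipStr q r0
  termination_by l => l.length
  decreasing_by all_goals simp_all

theorem pvDropLine_le (l : List Char) : (pvDropLine l).length ≤ l.length := by
  induction l with
  | nil => simp [pvDropLine]
  | cons c r ih => simp only [pvDropLine]; split <;> simp <;> omega

theorem pvDropBlock_le (l : List Char) : (pvDropBlock l).length ≤ l.length := by
  induction l using pvDropBlock.induct with
  | case1 => simp [pvDropBlock]
  | case2 => simp [pvDropBlock]; omega
  | case3 c r h ih => rw [pvDropBlock.eq_def]; split <;> simp_all <;> omega

theorem pvSkipStr_nil (q : Char) : pvSkipStr q [] = [] := by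
  rw [pvSkipStr.eq_def]

theorem pvSkipStr_cons (q c : Char) (r : List Char) :
    pvSkipStr q (c :: r) = match c, r with
      | '\\', _ :: r2 => pvSkipStr q r2
      | c0, r0 => if c0 = q then r0 else pvSkipStr q r0 := by
  rw [pvSkipStr.eq_def]

theorem pvSkipStr_le (q : Char) (l : List Char) : (pvSkipStr q l).length ≤ l.length := by
  induction l using pvSkipStr.induct q with
  | case1 => simp [pvSkipStr_nil]
  | case2 head rest2 ih => rw [pvSkipStr_cons]; simp only [List.length_cons]; omega
  | case3 r0 h =>
    rw [pvSkipStr_cons]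
    split
    · exact ((h _ _ rfl rfl).elim)
    · split
      · simp
      · rename_i hqq; exact absurd rfl hqq
  | case4 c0 r0 h hne ih =>
    rw [pvSkipStr_cons]
    split
    · exact ((h _ _ rfl rfl).elim)
    · rw [if_neg hne]; simp only [List.length_cons]; omega

-- port of Source B's main while-loop: the slice text[start:i] is carried as the reversed
-- current-segment accumulator `cur`
def pvTokB : List Char → List Char → List (List Char) → List (List Char)
  | [], cur, segs => segs ++ [cur.reverse]
  | c :: rest, cur, segs =>
    match c, rest with
    | '/', '/' :: r2 => pvTokB (pvDropLine r2) [] (segs ++ [cur.reverse])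
    | '/', '*' :: r2 => pvTokB (pvDropBlock r2) [] (segs ++ [cur.reverse])
    | c0, r0 =>
      if c0 = '"' ∨ c0 = '\'' then pvTokB (pvSkipStr c0 r0) [] (segs ++ [cur.reverse])
      else pvTokB r0 (c0 :: cur) segs
  termination_by cs _ _ => cs.length
  decreasing_by all_goals
    simp only [List.length_cons]
    first
      | (have := pvDropLine_le r2; omega)
      | (have := pvDropBlock_le r2; omega)
      | (have := pvSkipStr_le c0 r0; omega)
      | omega

-- Source B's `seg.count(open_ch)` with a single-character needle is exactly the character count
def pvSegCount (q : Char) (segs : List (List Char)) : Int :=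
  (segs.map (fun s => ((s.count q : Nat) : Int))).sum

def count_delimiters_alt (text : String) (open_ch : String) (close_ch : String) : Int × Int :=
  let segs := pvTokB text.toList [] []
  let opens := match open_ch.toList with | [q] => pvSegCount q segs | _ => 0
  let closes := match close_ch.toList with | [q] => pvSegCount q segs | _ => 0
  (opens, closes)

-- ===== PRECONDITION & SPEC =====
def Spec_count_delimiters (text : String) (open_ch : String) (close_ch : String) (out : Int × Int) : Prop := out = count_delimiters_alt text open_ch close_ch
instance (text : String) (open_ch : String) (close_ch : String) (out : Int × Int) : Decidable (Spec_count_delimiters text open_ch close_ch out) := by unfold Spec_count_delimiters; infer_instance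

-- ===== CLAIM (what is proved, stated in full; the proofs are below) =====
def Claim_equal_count_delimiters : Prop := ∀ (text : String) (open_ch : String) (close_ch : String), Dom_count_delimiters text open_ch close_ch → Spec_count_delimiters text open_ch close_ch (count_delimiters text open_ch close_ch)

-- ===== LEMMAS AND PROOFS =====

-- the code characters (those reaching A's counting branch), token-wise
def pvCode : List Char → List Char
  | [] => []
  | c :: rest =>
    match c, rest with
    | '/', '/' :: r2 => pvCode (pvDropLine r2)
    | '/', '*' :: r2 => pvCode (pvDropBlock r2)
    | c0, r0 =>
      if c0 = '"' ∨ c0 = '\'' then pvCode (pvSkipStr c0 r0)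
      else c0 :: pvCode r0
  termination_by cs => cs.length
  decreasing_by all_goals
    simp only [List.length_cons]
    first
      | (have := pvDropLine_le r2; omega)
      | (have := pvDropBlock_le r2; omega)
      | (have := pvSkipStr_le c0 r0; omega)
      | omega


theorem pvLoopA_nil (oc cc : String) (st : String) (o c : Int) :
    pvLoopA oc cc [] st o c = (o, c) := by
  rw [pvLoopA.eq_def]

theorem pvLoopA_cons (oc cc : String) (c : Char) (rest : List Char) (st : String) (o cl : Int) :
    pvLoopA oc cc (c :: rest) st o cl =
    (if st = "line" then
      pvLoopA oc cc rest (if c = '\n' then "code" else st) o cl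
    else if st = "block" then
      match c, rest with
      | '*', '/' :: rest2 => pvLoopA oc cc rest2 "code" o cl
      | _, r0 => pvLoopA oc cc r0 st o cl
    else if st = "dquote" ∨ st = "squote" then
      match c, rest with
      | '\\', _ :: rest2 => pvLoopA oc cc rest2 st o cl
      | c0, r0 =>
        pvLoopA oc cc r0
          (if c0 = (if st = "dquote" then '"' else '\'') then "code" else st) o cl
    else
      match c, rest with
      | '/', '/' :: rest2 => pvLoopA oc cc rest2 "line" o cl
      | '/', '*' :: rest2 => pvLoopA oc cc rest2 "block" o cl
      | c0, r0 =>
        if c0 = '"' then pvLoopA oc cc r0 "dquote" o cl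
        else if c0 = '\'' then pvLoopA oc cc r0 "squote" o cl
        else pvLoopA oc cc r0 st
          (o + (if oc.toList = [c0] then 1 else 0))
          (cl + (if cc.toList = [c0] then 1 else 0))) := by
  rw [pvLoopA.eq_def]; try rfl

theorem pvTokB_nil (cur : List Char) (segs : List (List Char)) :
    pvTokB [] cur segs = segs ++ [cur.reverse] := by
  rw [pvTokB.eq_def]

theorem pvTokB_cons (c : Char) (rest cur : List Char) (segs : List (List Char)) :
    pvTokB (c :: rest) cur segs =
    (match c, rest with
    | '/', '/' :: r2 => pvTokB (pvDropLine r2) [] (segs ++ [cur.reverse])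
    | '/', '*' :: r2 => pvTokB (pvDropBlock r2) [] (segs ++ [cur.reverse])
    | c0, r0 =>
      if c0 = '"' ∨ c0 = '\'' then pvTokB (pvSkipStr c0 r0) [] (segs ++ [cur.reverse])
      else pvTokB r0 (c0 :: cur) segs) := by
  rw [pvTokB.eq_def]; try rfl

theorem pvCode_nil : pvCode [] = [] := by rw [pvCode.eq_def]

theorem pvCode_cons (c : Char) (rest : List Char) :
    pvCode (c :: rest) =
    (match c, rest with
    | '/', '/' :: r2 => pvCode (pvDropLine r2)
    | '/', '*' :: r2 => pvCode (pvDropBlock r2)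
    | c0, r0 =>
      if c0 = '"' ∨ c0 = '\'' then pvCode (pvSkipStr c0 r0)
      else c0 :: pvCode r0) := by
  rw [pvCode.eq_def]; try rfl

theorem pvTokB_flatten (cs cur : List Char) (segs : List (List Char)) :
    (pvTokB cs cur segs).flatten = segs.flatten ++ cur.reverse ++ pvCode cs := by
  induction cs, cur, segs using pvTokB.induct with
  | case1 cur segs => rw [pvTokB_nil, pvCode_nil]; simp
  | case2 cur segs r2 ih => rw [pvTokB_cons, pvCode_cons]; simpa using ih
  | case3 cur segs r2 ih => rw [pvTokB_cons, pvCode_cons]; simpa using ih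
  | case4 cur segs c0 r0 h1 h2 hq ih =>
    rw [pvTokB_cons, pvCode_cons]
    rcases hq with h | h <;> subst h <;> split <;> simp_all
  | case5 cur segs c0 r0 h1 h2 hq ih =>
    rw [pvTokB_cons, pvCode_cons]
    split
    · exfalso; simp_all
    · exfalso; simp_all
    · rename_i c1 r1 _ _
      rw [if_neg hq, if_neg hq, ih]
      simp

theorem pvSegCount_flatten (q : Char) (segs : List (List Char)) :
    pvSegCount q segs = ((segs.flatten.count q : Nat) : Int) := by
  induction segs with
  | nil => simp [pvSegCount]
  | cons s ss ih =>
    simp only [pvSegCount, List.map_cons, List.sum_cons, List.flatten_cons, List.count_append]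
    rw [show (ss.map (fun s => ((s.count q : Nat) : Int))).sum = pvSegCount q ss from rfl, ih]
    omega

def pvCnt (needle : String) (l : List Char) : Int :=
  (l.map (fun ch => if needle.toList = [ch] then (1 : Int) else 0)).sum

theorem pvCnt_cons (needle : String) (c : Char) (l : List Char) :
    pvCnt needle (c :: l) = (if needle.toList = [c] then 1 else 0) + pvCnt needle l := by
  simp [pvCnt]

theorem pvCnt_single (needle : String) (q : Char) (h : needle.toList = [q]) (l : List Char) :
    pvCnt needle l = ((l.count q : Nat) : Int) := by
  induction l with
  | nil => simp [pvCnt]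
  | cons c r ih =>
    rw [pvCnt_cons, ih, h, List.count_cons]
    by_cases hc : c = q
    · simp [hc]; push_cast; ring
    · have hn : ¬([q] = [c]) := by simp; exact fun hh => hc hh.symm
      simp [hc, hn]

theorem pvCnt_other (needle : String) (h : ∀ q : Char, needle.toList ≠ [q]) (l : List Char) :
    pvCnt needle l = 0 := by
  induction l with
  | nil => simp [pvCnt]
  | cons c r ih => rw [pvCnt_cons, ih]; simp [h c]

theorem pvLoopA_line (oc cc : String) (cs : List Char) (o c : Int) :
    pvLoopA oc cc cs "line" o c = pvLoopA oc cc (pvDropLine cs) "code" o c := by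
  induction cs with
  | nil => simp [pvLoopA_nil, pvDropLine]
  | cons a r ih =>
    rw [pvLoopA_cons]
    simp only [reduceIte]
    by_cases ha : a = '\n'
    · simp [ha, pvDropLine]
    · simp [ha, pvDropLine, ih]

theorem pvLoopA_block (oc cc : String) (cs : List Char) (o c : Int) :
    pvLoopA oc cc cs "block" o c = pvLoopA oc cc (pvDropBlock cs) "code" o c := by
  induction cs using pvDropBlock.induct with
  | case1 => simp [pvLoopA_nil, pvDropBlock]
  | case2 r => rw [pvLoopA_cons]; simp [pvDropBlock]
  | case3 a r h ih =>
    rw [pvLoopA_cons]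
    simp only [String.reduceEq, reduceIte]
    have hd : pvDropBlock (a :: r) = pvDropBlock r := by
      rw [pvDropBlock.eq_def]
      split
      · simp_all
      · rename_i r1 heq
        injection heq with e1 e2
        exact ((h r1 e1 e2).elim)
      · rename_i hd1 r1 heq
        injection heq with e1 e2
        rw [e2]
    rw [hd]
    exact ih

theorem pvLoopA_str (oc cc : String) (st : String) (q : Char)
    (hst : st = "dquote" ∧ q = '"' ∨ st = "squote" ∧ q = '\'')
    (cs : List Char) (o c : Int) :
    pvLoopA oc cc cs st o c = pvLoopA oc cc (pvSkipStr q cs) "code" o c := by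
  have hne1 : ¬ st = "line" := by rcases hst with ⟨h, _⟩ | ⟨h, _⟩ <;> simp [h]
  have hne2 : ¬ st = "block" := by rcases hst with ⟨h, _⟩ | ⟨h, _⟩ <;> simp [h]
  have hor : st = "dquote" ∨ st = "squote" := by
    rcases hst with ⟨h, _⟩ | ⟨h, _⟩ <;> simp [h]
  have hqd : (if st = "dquote" then '"' else '\'') = q := by
    rcases hst with ⟨h1, h2⟩ | ⟨h1, h2⟩ <;> simp [h1, h2]
  induction cs using pvSkipStr.induct q with
  | case1 => simp [pvLoopA_nil, pvSkipStr_nil]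
  | case2 head rest2 ih =>
    rw [pvLoopA_cons, if_neg hne1, if_neg hne2, if_pos hor]
    rw [show pvSkipStr q ('\\' :: head :: rest2) = pvSkipStr q rest2 from by
      rw [pvSkipStr_cons]; try rfl]
    exact ih
  | case3 r0 h =>
    rw [pvLoopA_cons, if_neg hne1, if_neg hne2, if_pos hor]
    rw [show pvSkipStr q (q :: r0) = r0 from by
      rw [pvSkipStr_cons]
      split
      · exfalso; simp_all
      · rw [if_pos rfl]]
    split
    · exfalso; simp_all
    · rename_i c1 r1 _
      rw [hqd, if_pos rfl]
  | case4 c0 r0 h hne ih =>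
    rw [pvLoopA_cons, if_neg hne1, if_neg hne2, if_pos hor]
    rw [show pvSkipStr q (c0 :: r0) = pvSkipStr q r0 from by
      rw [pvSkipStr_cons]
      split
      · exfalso; simp_all
      · rw [if_neg hne]]
    split
    · exfalso; simp_all
    · rename_i c1 r1 _
      rw [hqd, if_neg hne]
      exact ih

theorem pvLoopA_code (oc cc : String) (cs : List Char) (o c : Int) :
    pvLoopA oc cc cs "code" o c = (o + pvCnt oc (pvCode cs), c + pvCnt cc (pvCode cs)) := by
  induction cs using pvCode.induct generalizing o c with
  | case1 => rw [pvLoopA_nil, pvCode_nil]; simp [pvCnt]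
  | case2 r2 ih =>
    rw [pvLoopA_cons]
    simp only [String.reduceEq, reduceIte, or_self]
    rw [show pvCode ('/' :: '/' :: r2) = pvCode (pvDropLine r2) from by rw [pvCode_cons]; try rfl]
    show pvLoopA oc cc r2 "line" o c = _
    rw [pvLoopA_line, ih]
  | case3 r2 ih =>
    rw [pvLoopA_cons]
    simp only [String.reduceEq, reduceIte, or_self]
    rw [show pvCode ('/' :: '*' :: r2) = pvCode (pvDropBlock r2) from by rw [pvCode_cons]; try rfl]
    show pvLoopA oc cc r2 "block" o c = _
    rw [pvLoopA_block, ih]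
  | case4 c0 r0 h1 h2 hq ih =>
    rw [pvLoopA_cons]
    simp only [String.reduceEq, reduceIte, or_self]
    rw [show pvCode (c0 :: r0) = pvCode (pvSkipStr c0 r0) from by
      rw [pvCode_cons]
      split
      · exfalso; simp_all
      · exfalso; simp_all
      · rw [if_pos hq]]
    split
    · rename_i hc; subst hc
      rw [pvLoopA_str oc cc "dquote" '"' (by simp), ih]
    · rename_i hc
      have hc' : c0 = '\'' := hq.resolve_left hc
      subst hc'
      rw [if_pos rfl, pvLoopA_str oc cc "squote" '\'' (by simp), ih]
  | case5 c0 r0 h1 h2 hq ih =>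
    rw [pvLoopA_cons]
    simp only [String.reduceEq, reduceIte, or_self]
    have ha : ¬(c0 = '"') := fun hh => hq (Or.inl hh)
    have ha' : ¬(c0 = '\'') := fun hh => hq (Or.inr hh)
    rw [show pvCode (c0 :: r0) = c0 :: pvCode r0 from by
      rw [pvCode_cons]
      split
      · exfalso; simp_all
      · exfalso; simp_all
      · rw [if_neg hq]]
    split
    · rename_i hc; exact absurd hc ha
    · rw [ih, pvCnt_cons, pvCnt_cons]
      rw [Prod.mk.injEq]
      constructor <;> ring

theorem count_delimiters_spec : Claim_equal_count_delimiters := by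
  intro text oc cc _
  unfold Spec_count_delimiters count_delimiters count_delimiters_alt
  rw [pvLoopA_code]
  have hflat : (pvTokB text.toList [] []).flatten = pvCode text.toList := by
    simpa using pvTokB_flatten text.toList [] []
  have hcnt : ∀ (needle : String),
      pvCnt needle (pvCode text.toList)
        = (match needle.toList with
            | [q] => pvSegCount q (pvTokB text.toList [] [])
            | _ => 0) := by
    intro needle
    rcases hn : needle.toList with _ | ⟨q, _ | ⟨x, r⟩⟩
    · simp [pvCnt_other needle (by simp [hn])]
    · simp [pvCnt_single needle q hn, pvSegCount_flatten, hflat]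
    · simp [pvCnt_other needle (by simp [hn])]
  simp only [hcnt, zero_add]
  try rfl
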